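-- pv_equiv track=rewrite | github.com/radosz99/allegro-scraper | scan/Scanner.py | get_title_from_url
-- ===== SOURCE A (Python) =====
-- def get_title_from_url(url, offer_id):
--     url_without_offer_id = url.split(str(offer_id))
--     url_without_offer_id = url_without_offer_id[0].split("oferta/")
--     title=url_without_offer_id[1].replace("-"," ")
--     list1 = list(title)
--     list1[0] = title[0].upper()
--     for x in range(len(title)-2):
--         if(title[x]==" "):
--             list1[x+1] = title[x+1].upper()
--
--     title = ''.join(list1[0:len(list1)-1])
--     return title
-- ===== SOURCE B (Python) =====
-- def get_title_from_url(url, offer_id):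
--     raw = url.split(str(offer_id))[0].split("oferta/")[1].replace("-", " ")
--     words = raw.split(" ")
--     return " ".join(w[:1].upper() + w[1:] for w in words)[:-1]
-- ===== Notes on version B (the rewrite author's own statement) =====
-- stated objective: idiomatic
-- what changed: A builds a char list and runs an index loop that mutates list1[x+1] to uppercase after each space; B splits the parsed title into words on ' ', capitalizes each word's first character with w[:1].upper()+w[1:], rejoins with ' ' and drops the last character.
import Mathlib
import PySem

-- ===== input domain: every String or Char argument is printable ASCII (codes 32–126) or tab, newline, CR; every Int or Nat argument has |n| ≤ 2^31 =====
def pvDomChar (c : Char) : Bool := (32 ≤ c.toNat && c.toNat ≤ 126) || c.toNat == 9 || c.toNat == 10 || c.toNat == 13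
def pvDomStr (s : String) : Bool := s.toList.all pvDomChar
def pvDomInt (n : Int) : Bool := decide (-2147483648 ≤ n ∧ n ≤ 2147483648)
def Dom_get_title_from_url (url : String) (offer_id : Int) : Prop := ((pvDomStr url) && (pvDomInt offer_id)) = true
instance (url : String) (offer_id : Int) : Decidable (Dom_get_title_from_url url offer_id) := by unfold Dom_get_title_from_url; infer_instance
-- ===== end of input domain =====

-- B replaces A's index-mutation loop (set list1[x+1] to uppercase after each space) by
-- splitting the title into words on ' ', capitalizing each word's first character, and
-- rejoining — objective: idiomatic; same return value on every input Pre_ admits.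

-- ===== PORT A =====
-- literal transliteration of A; url.split(...)[0] is (…).headD [] because str.split
-- never returns an empty list, so Python's [0] there never raises
def get_title_from_url (url : String) (offer_id : Int) : String :=
  let parts := PySem.Chars.splitOn url.toList (PySem.Int.toChars offer_id)
  let parts2 := PySem.Chars.splitOn (parts.headD []) "oferta/".toList
  match PySem.List.pyGet? parts2 1 with
  | none => ""  -- IndexError (no "oferta/"): excluded by Pre_
  | some t1 =>
    let title := PySem.Chars.replace t1 "-".toList " ".toList
    match PySem.List.pyGet? title 0 with
    | none => ""  -- IndexError on title[0] (empty title): excluded by Pre_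
    | some c0 =>
      let list1 := title.set 0 (PySem.Chars.upperChar c0)
      let list2 := (PySem.List.pyRange 0 ((title.length : Int) - 2) 1).foldl
        (fun l x =>
          if PySem.List.pyGetD title x ' ' == ' '
          then l.set (x + 1).toNat (PySem.Chars.upperChar (PySem.List.pyGetD title (x + 1) ' '))
          else l) list1
      String.ofList (PySem.List.slice list2 (some 0) (some ((list2.length : Int) - 1)))

-- ===== PORT B =====
-- w[:1].upper() + w[1:]
def pvCapWord (w : List Char) : List Char :=
  PySem.Chars.upper (PySem.List.slice w none (some 1)) ++ PySem.List.slice w (some 1) none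

def get_title_from_url_alt (url : String) (offer_id : Int) : String :=
  let parts := PySem.Chars.splitOn url.toList (PySem.Int.toChars offer_id)
  let parts2 := PySem.Chars.splitOn (parts.headD []) "oferta/".toList
  match PySem.List.pyGet? parts2 1 with
  | none => ""  -- IndexError (no "oferta/"), same as A
  | some t1 =>
    let raw := PySem.Chars.replace t1 "-".toList " ".toList
    let words := PySem.Chars.splitOn raw " ".toList
    String.ofList (PySem.List.slice (PySem.Chars.join " ".toList (words.map pvCapWord)) none (some (-1)))

-- ===== PRECONDITION & SPEC =====
-- Pre_ excludes exactly the inputs where A raises IndexError: urls whose part before the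
-- first str(offer_id) occurrence lacks "oferta/" (the [1] lookup fails, in B too) or whose
-- parsed title is empty (A's title[0] fails; B would return "" there).
def Pre_get_title_from_url (url : String) (offer_id : Int) : Prop :=
  let parts2 := PySem.Chars.splitOn ((PySem.Chars.splitOn url.toList (PySem.Int.toChars offer_id)).headD []) "oferta/".toList
  2 ≤ parts2.length ∧ parts2.getD 1 [] ≠ []
instance (url : String) (offer_id : Int) : Decidable (Pre_get_title_from_url url offer_id) := by unfold Pre_get_title_from_url; infer_instance
def pvWitness_get_title_from_url : String × Int := ("oferta/abc-def-5", 5)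

def Spec_get_title_from_url (url : String) (offer_id : Int) (out : String) : Prop := out = get_title_from_url_alt url offer_id
instance (url : String) (offer_id : Int) (out : String) : Decidable (Spec_get_title_from_url url offer_id out) := by unfold Spec_get_title_from_url; infer_instance

-- ===== CLAIM (what is proved, stated in full; the proofs are below) =====
def Claim_equal_get_title_from_url : Prop := ∀ (url : String) (offer_id : Int), Dom_get_title_from_url url offer_id → Pre_get_title_from_url url offer_id → Spec_get_title_from_url url offer_id (get_title_from_url url offer_id)

-- ===== LEMMAS AND PROOFS =====

-- reference recursion: capitalize position 0 (iff b) and every character after a space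
def pvCap (b : Bool) : List Char → List Char
  | [] => []
  | c :: r => (if b then PySem.Chars.upperChar c else c) :: pvCap (c == ' ') r

-- capitalize the head word iff b, all later words unconditionally
def pvMapHd (b : Bool) : List (List Char) → List (List Char)
  | [] => []
  | w :: ws => (if b then pvCapWord w else w) :: ws.map pvCapWord

theorem pvCap_length (b : Bool) (cs : List Char) : (pvCap b cs).length = cs.length := by
  induction cs generalizing b with
  | nil => rfl
  | cons c r ih => simp [pvCap, ih]

theorem pvCap_getD (cs : List Char) (b : Bool) (i : Nat) (h : i < cs.length) :
    (pvCap b cs).getD i ' ' =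
      if (if i = 0 then b else (cs.getD (i - 1) ' ' == ' ')) = true
      then PySem.Chars.upperChar (cs.getD i ' ') else cs.getD i ' ' := by
  induction cs generalizing b i with
  | nil => simp at h
  | cons c r ih =>
    cases i with
    | zero => simp [pvCap]
    | succ j =>
      simp only [pvCap, List.getD_cons_succ, Nat.succ_sub_one]
      rw [ih (c == ' ') j (by simpa using h)]
      cases j with
      | zero => simp
      | succ k => simp

theorem pvReplaceGo_single (a b : Char) :
    ∀ (l : List Char) (fuel : Nat) (acc : List Char), l.length ≤ fuel →
      PySem.Chars.replace.go [a] [b] fuel l acc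
        = acc.reverse ++ l.map (fun c => if c == a then b else c) := by
  intro l
  induction l with
  | nil => intro fuel acc _; cases fuel <;> simp [PySem.Chars.replace.go]
  | cons c t ih =>
    intro fuel acc hf
    cases fuel with
    | zero => simp at hf
    | succ f =>
      by_cases hc : c = a
      · have hpre : List.isPrefixOf [a] (c :: t) = true := by simp [List.isPrefixOf, hc]
        simp only [PySem.Chars.replace.go, hpre, if_true, List.length_cons, List.length_nil,
          List.drop_succ_cons, List.drop_zero, List.reverse_cons, List.reverse_nil, List.nil_append]
        rw [ih f ([b] ++ acc) (by simpa using hf)]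
        simp [hc]
      · have hpre : List.isPrefixOf [a] (c :: t) = false := by
          simp [List.isPrefixOf]; exact fun h => absurd h.symm hc
        simp only [PySem.Chars.replace.go, hpre, Bool.false_eq_true, if_false]
        rw [ih f (c :: acc) (by simpa using hf)]
        simp [hc]

theorem pvReplace_single (cs : List Char) (a b : Char) :
    PySem.Chars.replace cs [a] [b] = cs.map (fun c => if c == a then b else c) := by
  have := pvReplaceGo_single a b cs cs.length [] (le_refl _)
  simpa [PySem.Chars.replace] using this

theorem pvSplitGo_single (a : Char) :
    ∀ (l : List Char) (fuel : Nat) (cur : List Char) (acc : List (List Char)), l.length < fuel →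
      PySem.Chars.splitOn.go [a] fuel l cur acc
        = acc.reverse ++ (l.splitOn a).modifyHead (cur.reverse ++ ·) := by
  intro l
  induction l with
  | nil =>
    intro fuel cur acc h
    cases fuel with
    | zero => simp at h
    | succ f => simp [PySem.Chars.splitOn.go, List.splitOn]
  | cons c t ih =>
    intro fuel cur acc h
    cases fuel with
    | zero => simp at h
    | succ f =>
      by_cases hc : c = a
      · have hpre : List.isPrefixOf [a] (c :: t) = true := by simp [List.isPrefixOf, hc]
        simp only [PySem.Chars.splitOn.go, hpre, if_true, List.length_cons, List.length_nil,
          List.drop_succ_cons, List.drop_zero]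
        rw [ih f [] (cur.reverse :: acc) (by simpa using h)]
        simp only [List.splitOn, List.splitOnP_cons, hc, beq_self_eq_true, if_true]
        cases List.splitOnP (fun x => x == a) t <;> simp
      · have hpre : List.isPrefixOf [a] (c :: t) = false := by
          simp [List.isPrefixOf]; exact fun h => absurd h.symm hc
        simp only [PySem.Chars.splitOn.go, hpre, Bool.false_eq_true, if_false]
        rw [ih f (c :: cur) acc (by simpa using h)]
        have hne : (c == a) = false := by simp [hc]
        simp [List.splitOn, List.splitOnP_cons, hne, List.modifyHead_modifyHead, Function.comp_def]

theorem pvSplitOn_single (cs : List Char) (a : Char) :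
    PySem.Chars.splitOn cs [a] = cs.splitOn a := by
  have := pvSplitGo_single a cs (cs.length + 1) [] [] (by omega)
  simp only [PySem.Chars.splitOn] at *
  rw [this]
  cases List.splitOn a cs <;> simp

theorem pvCapWord_nil : pvCapWord [] = [] := by decide

theorem pvCapWord_cons (c : Char) (w : List Char) :
    pvCapWord (c :: w) = PySem.Chars.upperChar c :: w := by
  simp [pvCapWord, PySem.List.slice_to (c::w) (by norm_num : (0:Int) ≤ 1),
    PySem.List.slice_from (c::w) (by norm_num : (0:Int) ≤ 1), PySem.Chars.upper]

theorem pvIntercalate_cons_head (sep : List Char) (y : Char) (w : List Char) (L : List (List Char)) :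
    List.intercalate sep ((y :: w) :: L) = y :: List.intercalate sep (w :: L) := by
  cases L <;> simp [List.intercalate, List.intersperse]

theorem pvJoin_mapHd (cs : List Char) (b : Bool) :
    List.intercalate [' '] (pvMapHd b (cs.splitOn ' ')) = pvCap b cs := by
  induction cs generalizing b with
  | nil =>
    simp [List.splitOn, pvMapHd, pvCap, List.intercalate]
    cases b <;> simp [pvCapWord_nil]
  | cons c r ih =>
    obtain ⟨w, ws, hw⟩ : ∃ w ws, List.splitOnP (fun x => x == ' ') r = w :: ws :=
      List.exists_cons_of_ne_nil (List.splitOnP_ne_nil _ _)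
    have ihT := ih true
    have ihF := ih false
    simp only [List.splitOn, hw, pvMapHd, if_true, Bool.false_eq_true, if_false] at ihT ihF
    by_cases hc : c = ' '
    · subst hc
      simp only [List.splitOn, List.splitOnP_cons, beq_self_eq_true, if_true, hw]
      have : pvMapHd b ([] :: w :: ws) = [] :: pvCapWord w :: ws.map pvCapWord := by
        cases b <;> simp [pvMapHd, pvCapWord_nil]
      rw [this]
      have : List.intercalate [' '] ([] :: pvCapWord w :: List.map pvCapWord ws)
           = ' ' :: List.intercalate [' '] (pvCapWord w :: List.map pvCapWord ws) := by
        simp [List.intercalate, List.intersperse]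
      rw [this, ihT]
      have hsp : PySem.Chars.upperChar ' ' = ' ' := by decide
      simp [pvCap, hsp]
    · have hne : (c == ' ') = false := by simp [hc]
      simp only [List.splitOn, List.splitOnP_cons, hne, Bool.false_eq_true, if_false, hw,
        List.modifyHead]
      have : pvMapHd b ((c :: w) :: ws) = ((if b then PySem.Chars.upperChar c else c) :: w) :: ws.map pvCapWord := by
        cases b <;> simp [pvMapHd, pvCapWord_cons]
      rw [this, pvIntercalate_cons_head, ihF]
      simp [pvCap, hne]

theorem pvLoop_spec (title l0 : List Char) (hl : l0.length = title.length) (m : Nat)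
    (hm : m + 2 ≤ title.length) :
    ((PySem.List.pyRange 0 (m : Int) 1).foldl
      (fun l x =>
        if PySem.List.pyGetD title x ' ' == ' '
        then l.set (x + 1).toNat (PySem.Chars.upperChar (PySem.List.pyGetD title (x + 1) ' '))
        else l) l0).length = title.length ∧
      ∀ i, i < title.length →
        ((PySem.List.pyRange 0 (m : Int) 1).foldl
          (fun l x =>
            if PySem.List.pyGetD title x ' ' == ' '
            then l.set (x + 1).toNat (PySem.Chars.upperChar (PySem.List.pyGetD title (x + 1) ' '))
            else l) l0).getD i ' ' =
          if 1 ≤ i ∧ i ≤ m ∧ title.getD (i - 1) ' ' == ' '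
          then PySem.Chars.upperChar (title.getD i ' ') else l0.getD i ' ' := by
  induction m with
  | zero =>
    have h0 : PySem.List.pyRange 0 ((0:Nat) : Int) 1 = [] := by simp [PySem.List.pyRange]
    rw [h0]
    refine ⟨hl, ?_⟩
    intro i hi
    simp only [List.foldl_nil]
    have : ¬ (1 ≤ i ∧ i ≤ 0 ∧ title.getD (i - 1) ' ' == ' ') := by rintro ⟨h1, h2, _⟩; omega
    rw [if_neg this]
  | succ k ih =>
    have hk := ih (by omega)
    have hr : PySem.List.pyRange 0 (((k+1:Nat)) : Int) 1 = PySem.List.pyRange 0 (k:Int) 1 ++ [(k:Int)] := by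
      push_cast
      exact PySem.List.pyRange_one_succ_right (by positivity)
    rw [hr, List.foldl_append]
    set L := (PySem.List.pyRange 0 (k:Int) 1).foldl
      (fun l x =>
        if PySem.List.pyGetD title x ' ' == ' '
        then l.set (x + 1).toNat (PySem.Chars.upperChar (PySem.List.pyGetD title (x + 1) ' '))
        else l) l0 with hL
    have hgk : PySem.List.pyGetD title (k:Int) ' ' = title.getD k ' ' := by simp [pysem]
    have hgk1 : PySem.List.pyGetD title ((k:Int) + 1) ' ' = title.getD (k+1) ' ' := by
      rw [PySem.List.pyGetD_of_nonneg title ' ' (by positivity)]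
      norm_num
    have htn : ((k:Int) + 1).toNat = k + 1 := by omega
    simp only [List.foldl_cons, List.foldl_nil, hgk, hgk1, htn]
    by_cases hsp : title.getD k ' ' == ' '
    · simp only [hsp, if_true]
      constructor
      · rw [List.length_set]; exact hk.1
      · intro i hi
        rw [List.getD_eq_getElem?_getD, List.getElem?_set]
        by_cases hik : k + 1 = i
        · subst hik
          have hlt : k + 1 < L.length := by rw [hk.1]; omega
          simp only [hlt, if_true, Option.getD_some]
          have : 1 ≤ k + 1 ∧ k + 1 ≤ k + 1 ∧ title.getD (k + 1 - 1) ' ' == ' ' := by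
            refine ⟨by omega, by omega, ?_⟩; simpa using hsp
          rw [if_pos this]
        · simp only [hik, if_false]
          rw [← List.getD_eq_getElem?_getD, hk.2 i hi]
          by_cases hcond : 1 ≤ i ∧ i ≤ k ∧ title.getD (i - 1) ' ' == ' '
          · rw [if_pos hcond, if_pos ⟨hcond.1, by omega, hcond.2.2⟩]
          · have : ¬ (1 ≤ i ∧ i ≤ k + 1 ∧ title.getD (i - 1) ' ' == ' ') := by
              rintro ⟨h1, h2, h3⟩
              exact hcond ⟨h1, by omega, h3⟩
            rw [if_neg hcond, if_neg this]
    · have hsp' : (title.getD k ' ' == ' ') = false := by simpa using hsp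
      simp only [hsp', Bool.false_eq_true, if_false]
      refine ⟨hk.1, ?_⟩
      intro i hi
      rw [hk.2 i hi]
      by_cases hcond : 1 ≤ i ∧ i ≤ k ∧ title.getD (i - 1) ' ' == ' '
      · rw [if_pos hcond, if_pos ⟨hcond.1, by omega, hcond.2.2⟩]
      · have hnot : ¬ (1 ≤ i ∧ i ≤ k + 1 ∧ title.getD (i - 1) ' ' == ' ') := by
          rintro ⟨h1, h2, h3⟩
          rcases Nat.lt_or_ge i (k+1) with hlt | hge
          · exact hcond ⟨h1, by omega, h3⟩
          · have : i = k + 1 := by omega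
            subst this
            simp only [Nat.add_sub_cancel] at h3
            exact absurd h3 (by simpa using hsp)
        rw [if_neg hcond, if_neg hnot]


theorem pvPyGet?_one {α : Type} [Inhabited α] (l : List α) (h : 2 ≤ l.length) (d : α) :
    PySem.List.pyGet? l 1 = some (l.getD 1 d) := by
  simp only [PySem.List.pyGet?, PySem.List.pyIdx?]
  have h1 : (1:Int) < (l.length:Int) := by exact_mod_cast h
  have hlt : 1 < l.length := by omega
  rw [if_pos (by norm_num : (0:Int) ≤ 1), if_pos h1]
  rw [List.getD_eq_getElem?_getD, List.getElem?_eq_getElem hlt]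
  simp

theorem pvFinal (L2 title : List Char) (hlen : L2.length = title.length)
    (hchar : ∀ i, i < title.length - 1 → L2.getD i ' ' = (pvCap true title).getD i ' ') :
    L2.dropLast = (pvCap true title).dropLast := by
  apply List.ext_getElem
  · simp [hlen, pvCap_length]
  · intro i h1 h2
    rw [List.getElem_dropLast, List.getElem_dropLast]
    have hi : i < title.length - 1 := by simpa [hlen] using h1
    have e1 : L2[i]'(by omega) = L2.getD i ' ' := by
      rw [List.getD_eq_getElem L2 ' ' (by omega)]
    have e2 : (pvCap true title)[i]'(by rw [pvCap_length]; omega) = (pvCap true title).getD i ' ' := by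
      rw [List.getD_eq_getElem (pvCap true title) ' ' (by rw [pvCap_length]; omega)]
    rw [e1, e2, hchar i hi]

-- ===== VERDICT (by name: the statement is the Claim_ definition above) =====
theorem get_title_from_url_spec : Claim_equal_get_title_from_url := by
  intro url offer_id _dom hpre
  unfold Spec_get_title_from_url
  unfold Pre_get_title_from_url at hpre
  simp only at hpre
  obtain ⟨h2, hne⟩ := hpre
  unfold get_title_from_url get_title_from_url_alt
  simp only
  set parts2 := PySem.Chars.splitOn ((PySem.Chars.splitOn url.toList (PySem.Int.toChars offer_id)).headD []) "oferta/".toList with hp2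
  rw [pvPyGet?_one parts2 h2 []]
  dsimp only
  set t1 := parts2.getD 1 [] with ht1
  set title := PySem.Chars.replace t1 "-".toList " ".toList with htitle
  have htm : title = t1.map (fun c => if c == '-' then ' ' else c) := pvReplace_single t1 '-' ' '
  have htne : title ≠ [] := by
    rw [htm]; simpa using hne
  obtain ⟨c0, rest, hcons⟩ := List.exists_cons_of_ne_nil htne
  have hget0 : PySem.List.pyGet? title 0 = some c0 := by
    rw [hcons]; simp [PySem.List.pyGet?, PySem.List.pyIdx?]
  rw [hget0]
  dsimp only
  -- B side: join of capitalized words = pvCap true title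
  have hBjoin : PySem.Chars.join " ".toList ((PySem.Chars.splitOn title " ".toList).map pvCapWord)
      = pvCap true title := by
    have hs : PySem.Chars.splitOn title " ".toList = title.splitOn ' ' := by
      have : (" ".toList : List Char) = [' '] := by decide
      rw [this]; exact pvSplitOn_single title ' '
    rw [hs]
    obtain ⟨w, ws, hw⟩ : ∃ w ws, title.splitOn ' ' = w :: ws := by
      simp only [List.splitOn]
      exact List.exists_cons_of_ne_nil (List.splitOnP_ne_nil _ _)
    have hmap : (title.splitOn ' ').map pvCapWord = pvMapHd true (title.splitOn ' ') := by
      rw [hw]; simp [pvMapHd]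
    rw [hmap]
    have : (" ".toList : List Char) = [' '] := by decide
    rw [this]
    show List.intercalate [' '] (pvMapHd true (title.splitOn ' ')) = pvCap true title
    exact pvJoin_mapHd title true
  rw [hBjoin]
  have hBslice : PySem.List.slice (pvCap true title) none (some (-1)) = (pvCap true title).dropLast := by
    simp [pysem]
  rw [hBslice]
  -- A side
  set l1 := title.set 0 (PySem.Chars.upperChar c0) with hl1
  have hl1c : l1 = PySem.Chars.upperChar c0 :: rest := by rw [hl1, hcons]; rfl
  have hl1len : l1.length = title.length := by rw [hl1, List.length_set]
  set L2 := (PySem.List.pyRange 0 ((title.length : Int) - 2) 1).foldl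
        (fun l x =>
          if PySem.List.pyGetD title x ' ' == ' '
          then l.set (x + 1).toNat (PySem.Chars.upperChar (PySem.List.pyGetD title (x + 1) ' '))
          else l) l1 with hL2
  have hn1 : 1 ≤ title.length := by rw [hcons]; simp
  have hkey : L2.length = title.length ∧
      ∀ i, i < title.length - 1 → L2.getD i ' ' = (pvCap true title).getD i ' ' := by
    rcases Nat.lt_or_ge title.length 2 with hsmall | hbig
    · -- title.length = 1
      have hone : title.length = 1 := by omega
      have hrange : PySem.List.pyRange 0 ((title.length : Int) - 2) 1 = [] := by
        rw [hone]; simp [PySem.List.pyRange]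
      have : L2 = l1 := by rw [hL2, hrange]; rfl
      refine ⟨by rw [this, hl1len], ?_⟩
      intro i hi; omega
    · -- title.length ≥ 2
      have hcast : ((title.length : Int) - 2) = ((title.length - 2 : Nat) : Int) := by omega
      rw [hL2, hcast]
      have hspec := pvLoop_spec title l1 hl1len (title.length - 2) (by omega)
      refine ⟨hspec.1, ?_⟩
      intro i hi
      rw [hspec.2 i (by omega), pvCap_getD title true i (by omega)]
      rcases Nat.eq_zero_or_pos i with h0 | hpos
      · subst h0
        have : ¬ (1 ≤ 0 ∧ 0 ≤ title.length - 2 ∧ title.getD (0-1) ' ' == ' ') := by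
          rintro ⟨h, _, _⟩; omega
        rw [if_neg this]
        simp only [if_pos rfl]
        rw [hl1c, hcons]
        rfl
      · have hle : i ≤ title.length - 2 := by omega
        have hiff : (1 ≤ i ∧ i ≤ title.length - 2 ∧ title.getD (i-1) ' ' == ' ')
            ↔ ((if i = 0 then true else title.getD (i-1) ' ' == ' ') = true) := by
          rw [if_neg (by omega : ¬ i = 0)]
          constructor
          · rintro ⟨_, _, h⟩; exact h
          · intro h; exact ⟨hpos, hle, h⟩
        by_cases hcond : (if i = 0 then true else (title.getD (i-1) ' ' == ' ')) = true
        · rw [if_pos (hiff.mpr hcond), if_pos hcond]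
        · rw [if_neg (fun h => hcond (hiff.mp h)), if_neg hcond]
          -- l1.getD i = title.getD i for i ≥ 1
          rw [hl1c, hcons]
          obtain ⟨j, rfl⟩ : ∃ j, i = j + 1 := ⟨i - 1, by omega⟩
          simp [List.getD_cons_succ]
  have hAslice : PySem.List.slice L2 (some 0) (some ((L2.length : Int) - 1)) = L2.dropLast := by
    have hcast : ((L2.length : Int) - 1) = ((L2.length - 1 : Nat) : Int) := by
      have := hkey.1; omega
    rw [hcast]
    have h0 : (some (0:Int)) = some (((0:Nat)) : Int) := by norm_num
    rw [h0, PySem.List.slice_natCast]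
    simp [List.dropLast_eq_take]
  rw [hAslice]
  exact congrArg String.ofList (pvFinal L2 title hkey.1 hkey.2)
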